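-- pv_equiv track=rewrite | github.com/rishabhjain02/Data-Structures-And-Algorithms | Segment Trees/Binary updates.py | solve
-- ===== SOURCE A (Python) =====
-- def build_segment_tree(st, start, end, pos):
--     if start == end:
--         st[pos] = 1
--         return
--
--     mid = (start + end)//2
--
--     build_segment_tree(st, start, mid, 2*pos+1)
--     build_segment_tree(st, mid+1, end, 2*pos+2)
--
--     st[pos] = st[2*pos+1] + st[2*pos+2]
--
-- def update(st, start, end, index, pos):
--     if start == end and start == index:
--         st[pos] = 0
--         return
--
--     mid = (start + end)//2
--
--     if index <= mid:
--         update(st, start, mid, index, 2*pos+1)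
--     else:
--         update(st, mid+1, end, index, 2*pos+2)
--
--     st[pos] = st[2*pos+1] + st[2*pos+2]
--
-- def count_one(st, start, end, k, pos):
--     if end-start+1 == st[pos]:
--         return start+k
--
--     if start == end:
--         return -1
--
--     mid = (start + end)//2
--
--     if st[2*pos+1] >= k:
--         return count_one(st, start, mid, k, 2*pos+1)
--     else:
--         return count_one(st, mid+1, end, k-st[2*pos+1], 2*pos+2)
--
-- def solve(A, B):
--     n = A
--     st = [0 for i in range(4*n)]
--     ans = []
--
--     build_segment_tree(st, 0, n-1, 0)
--
--     for query in B:
--         if query[0] == 0: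
--             update(st, 0, n-1, query[1]-1, 0)
--         else:
--             if query[1] > st[0]:
--                 ans.append(-1)
--             else:
--                 ans.append(count_one(st, 0, n-1, query[1], 0))
--
--     return ans
-- ===== SOURCE B (Python) =====
-- def solve(A, B):
--     # Keep the surviving 1-based positions in a sorted list; a k-th query
--     # is a direct index, a delete is a membership test + removal.
--     alive = list(range(1, A + 1))
--     ans = []
--     for q0, q1 in B:
--         if q0 == 0:
--             if q1 in alive:
--                 alive.remove(q1)
--         else:
--             if q1 > len(alive):
--                 ans.append(-1)
--             else:
--                 ans.append(alive[q1 - 1])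
--     return ans
-- ===== Notes on version B (the rewrite author's own statement) =====
-- stated objective: simpler
-- what changed: Replaces the recursive segment tree (build/update/count_one over a 4n array) by a plain sorted list of surviving 1-based positions: a delete is a membership test plus list.remove, a k-th query is a direct index alive[k-1].
-- outside the precondition, e.g. on solve(1, [(1, 0)]): A returns [0], B returns [1]; on solve(1, [(1, -2)]): A returns [-2], B raises IndexError
import Mathlib
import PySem

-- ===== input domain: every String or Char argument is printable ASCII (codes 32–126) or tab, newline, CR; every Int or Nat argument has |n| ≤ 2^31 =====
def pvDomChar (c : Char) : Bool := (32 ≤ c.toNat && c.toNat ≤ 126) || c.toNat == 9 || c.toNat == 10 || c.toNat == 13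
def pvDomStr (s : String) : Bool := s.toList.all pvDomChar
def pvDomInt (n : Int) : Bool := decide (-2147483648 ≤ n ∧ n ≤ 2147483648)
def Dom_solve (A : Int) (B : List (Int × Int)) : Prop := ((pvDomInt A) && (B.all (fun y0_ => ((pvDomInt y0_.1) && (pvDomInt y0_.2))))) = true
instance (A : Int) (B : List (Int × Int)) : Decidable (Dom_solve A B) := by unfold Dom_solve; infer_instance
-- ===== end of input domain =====

-- B replaces A's recursive segment tree by a plain sorted list of the surviving
-- 1-based positions (delete = membership test + remove, k-th query = direct index):
-- simpler, not faster.

-- midpoint helper: Python's (start + end)//2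
def pvMid (s e : Int) : Int := PySem.Int.floordiv (s + e) 2

-- ===== PORT A =====
-- The Python list st ([0]*(4*n), mutated in place) is ported as an integer-keyed
-- map with default value 0 (exact for every access Python performs without
-- IndexError; under Pre_solve every tree position accessed lies inside the 4*n
-- array, and every entry is written before it is read).
def stGet (st : Std.HashMap Int Int) (p : Int) : Int := st.getD p 0

def stSet (st : Std.HashMap Int Int) (p v : Int) : Std.HashMap Int Int := st.insert p v

-- recursion on ranges needs fuel: fuel ≥ range size suffices (each recursive
-- call strictly shrinks the range); Python's unbounded recursion (which
-- overflows for n ≤ 0 or out-of-range updates) is outside Pre_solve.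
def buildST : Nat → Std.HashMap Int Int → Int → Int → Int → Std.HashMap Int Int
  | 0, st, _, _, _ => st
  | f+1, st, s, e, pos =>
    if s = e then stSet st pos 1
    else
      let mid := pvMid s e
      let st1 := buildST f st s mid (2*pos+1)
      let st2 := buildST f st1 (mid+1) e (2*pos+2)
      stSet st2 pos (stGet st2 (2*pos+1) + stGet st2 (2*pos+2))

def updateST : Nat → Std.HashMap Int Int → Int → Int → Int → Int → Std.HashMap Int Int
  | 0, st, _, _, _, _ => st
  | f+1, st, s, e, idx, pos =>
    if s = e ∧ s = idx then stSet st pos 0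
    else
      let mid := pvMid s e
      let st1 := if idx ≤ mid then updateST f st s mid idx (2*pos+1)
                 else updateST f st (mid+1) e idx (2*pos+2)
      stSet st1 pos (stGet st1 (2*pos+1) + stGet st1 (2*pos+2))

def countOne : Nat → Std.HashMap Int Int → Int → Int → Int → Int → Int
  | 0, _, _, _, _, _ => 0   -- fuel is never exhausted under Pre_solve
  | f+1, st, s, e, k, pos =>
    if e - s + 1 = stGet st pos then s + k
    else if s = e then -1
    else
      let mid := pvMid s e
      if k ≤ stGet st (2*pos+1) then countOne f st s mid k (2*pos+1)
      else countOne f st (mid+1) e (k - stGet st (2*pos+1)) (2*pos+2)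

def solveStep (n : Int) (fuel : Nat) (acc : Std.HashMap Int Int × List Int) (q : Int × Int) :
    Std.HashMap Int Int × List Int :=
  if q.1 = 0 then (updateST fuel acc.1 0 (n-1) (q.2 - 1) 0, acc.2)
  else if stGet acc.1 0 < q.2 then (acc.1, acc.2 ++ [-1])
  else (acc.1, acc.2 ++ [countOne fuel acc.1 0 (n-1) q.2 0])

def solve (A : Int) (B : List (Int × Int)) : List Int :=
  let n := A
  let fuel := n.toNat
  let st := buildST fuel ∅ 0 (n-1) 0
  (B.foldl (solveStep n fuel) (st, [])).2

-- ===== PORT B =====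
def solveAltStep (acc : List Int × List Int) (q : Int × Int) : List Int × List Int :=
  if q.1 = 0 then
    (if q.2 ∈ acc.1 then (PySem.List.remove? acc.1 q.2).getD acc.1 else acc.1, acc.2)
  else if (acc.1.length : Int) < q.2 then (acc.1, acc.2 ++ [-1])
  else (acc.1, acc.2 ++ [(PySem.List.pyGet? acc.1 (q.2 - 1)).getD (-1)])

def solve_alt (A : Int) (B : List (Int × Int)) : List Int :=
  (B.foldl solveAltStep (PySem.List.pyRange 1 (A+1) 1, [])).2

-- ===== PRECONDITION & SPEC =====
-- Pre_solve keeps A's domain of normal return, restricted to the natural domain of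
-- the queries: for A ≤ 0 or a delete position outside [1, A] the Python A hits
-- RecursionError/IndexError; k-th queries with k ≤ 0 are outside the natural domain
-- of a k-th-element query (A returns an accidental value of its always-descend-left
-- recursion there, and B raises IndexError via a negative list index).
def Pre_solve (A : Int) (B : List (Int × Int)) : Prop :=
  1 ≤ A ∧ ∀ q ∈ B, (q.1 = 0 → 1 ≤ q.2 ∧ q.2 ≤ A) ∧ (q.1 ≠ 0 → 1 ≤ q.2)
instance (A : Int) (B : List (Int × Int)) : Decidable (Pre_solve A B) := by
  unfold Pre_solve; infer_instance

def pvWitness_solve : Int × (List (Int × Int)) := (3, [(0, 2), (1, 2), (1, 3), (0, 2), (1, 1)])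

def Spec_solve (A : Int) (B : List (Int × Int)) (out : List Int) : Prop := out = solve_alt A B
instance (A : Int) (B : List (Int × Int)) (out : List Int) : Decidable (Spec_solve A B out) := by
  unfold Spec_solve; infer_instance

-- ===== CLAIM (what is proved, stated in full; the proofs are below) =====
def Claim_equal_solve : Prop :=
  ∀ (A : Int) (B : List (Int × Int)), Dom_solve A B → Pre_solve A B → Spec_solve A B (solve A B)

-- ===== LEMMAS AND PROOFS =====

lemma pvMid_bounds {s e : Int} (h : s < e) : s ≤ pvMid s e ∧ pvMid s e < e := by
  have h2 : (0:Int) < 2 := by norm_num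
  have hd : pvMid s e = (s + e) / 2 := PySem.Int.floordiv_eq_ediv_of_pos h2
  have h1 := Int.ediv_add_emod (s + e) 2
  have h3 := Int.emod_nonneg (s + e) (by norm_num : (2:Int) ≠ 0)
  have h4 := Int.emod_lt_of_pos (s + e) h2
  omega

-- number of alive (d = true) tree indices in [s, e]
def cnt (d : Int → Bool) (s e : Int) : Int :=
  (((PySem.List.pyRange s (e+1) 1).filter d).length : Int)

-- point update of the alive map
def dset (d : Int → Bool) (i : Int) : Int → Bool := fun x => if x = i then false else d x

-- heap-numbering descendant relation on 0-based positions: q lies in the subtree of p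
def Des (p q : Int) : Prop := ∃ j : Nat, (q+1).toNat / 2^j = (p+1).toNat

-- the segment-tree invariant, by fuel (lemmas use it with (e-s).toNat < fuel)
def TInv : Nat → Std.HashMap Int Int → (Int → Bool) → Int → Int → Int → Prop
  | 0, _, _, _, _, _ => True
  | f+1, st, d, s, e, pos =>
      stGet st pos = cnt d s e ∧
      (s ≠ e → TInv f st d s (pvMid s e) (2*pos+1) ∧ TInv f st d (pvMid s e + 1) e (2*pos+2))

lemma Des_refl (p : Int) : Des p p := ⟨0, by simp⟩

lemma Des_trans {p q r : Int} (h1 : Des p q) (h2 : Des q r) : Des p r := by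
  obtain ⟨j, hj⟩ := h1
  obtain ⟨j', hj'⟩ := h2
  exact ⟨j' + j, by rw [pow_add, ← Nat.div_div_eq_div_mul, hj', hj]⟩

lemma Des_left {p : Int} (hp : 0 ≤ p) : Des p (2*p+1) := by
  refine ⟨1, ?_⟩
  have : (2*p+1+1).toNat = 2 * (p+1).toNat := by omega
  rw [this]; omega

lemma Des_right {p : Int} (hp : 0 ≤ p) : Des p (2*p+2) := by
  refine ⟨1, ?_⟩
  have : (2*p+2+1).toNat = 2 * (p+1).toNat + 1 := by omega
  rw [this]; omega

lemma Des_le {p q : Int} (hp : 0 ≤ p) (h : Des p q) : p ≤ q := by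
  obtain ⟨j, hj⟩ := h
  have := Nat.div_le_self (q+1).toNat (2^j)
  omega

lemma Des_disjoint {p q : Int} (hp : 0 ≤ p) (h1 : Des (2*p+1) q) (h2 : Des (2*p+2) q) : False := by
  obtain ⟨j, hj⟩ := h1
  obtain ⟨j', hj'⟩ := h2
  have e1 : (2*p+1+1).toNat = 2 * (p+1).toNat := by omega
  have e2 : (2*p+2+1).toNat = 2 * (p+1).toNat + 1 := by omega
  rw [e1] at hj; rw [e2] at hj'
  set m := (p+1).toNat with hm
  have hmpos : 0 < m := by omega
  set Q := (q+1).toNat with hQ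
  -- the two shifts of Q cannot be 2m and 2m+1
  rcases Nat.lt_trichotomy j j' with hlt | heq | hgt
  · -- Q >> j = 2m, Q >> j' = 2m+1 with j < j' : 2m+1 = (Q>>j) >> (j'-j) = 2m >> (j'-j) ≤ m
    have : Q / 2^j' = (Q / 2^j) / 2^(j'-j) := by
      rw [Nat.div_div_eq_div_mul, ← pow_add]
      have hexp : j + (j' - j) = j' := by omega
      rw [hexp]
    rw [this, hj] at hj'
    have h1 : 2*m / 2^(j'-j) ≤ 2*m / 2^1 := Nat.div_le_div_left (Nat.pow_le_pow_right (by norm_num) (by omega)) (by positivity)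
    simp at h1
    omega
  · rw [heq, hj'] at hj; omega
  · have : Q / 2^j = (Q / 2^j') / 2^(j-j') := by
      rw [Nat.div_div_eq_div_mul, ← pow_add]
      have hexp : j' + (j - j') = j := by omega
      rw [hexp]
    rw [this, hj'] at hj
    have h1 : (2*m+1) / 2^(j-j') ≤ (2*m+1) / 2^1 := Nat.div_le_div_left (Nat.pow_le_pow_right (by norm_num) (by omega)) (by positivity)
    have h2 : (2*m+1) / 2^1 = m := by omega
    omega

lemma stSet_self (st : Std.HashMap Int Int) (p v : Int) : stGet (stSet st p v) p = v := by
  simp [stGet, stSet]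

lemma stSet_ne (st : Std.HashMap Int Int) (p v q : Int) (h : q ≠ p) :
    stGet (stSet st p v) q = stGet st q := by
  unfold stGet stSet
  rw [Std.HashMap.getD_insert]
  simp only [beq_iff_eq, ite_eq_right_iff]
  intro hpq
  exact absurd hpq.symm h

-- builds/updates only write inside the subtree of pos
lemma buildST_frame (f : Nat) : ∀ (st : Std.HashMap Int Int) (s e pos : Int), 0 ≤ pos →
    ∀ q, ¬ Des pos q → stGet (buildST f st s e pos) q = stGet st q := by
  induction f with
  | zero => intro st s e pos _ q _; rfl
  | succ f ih =>
    intro st s e pos hp q hq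
    have hne : q ≠ pos := fun h => hq (h ▸ Des_refl pos)
    by_cases hse : s = e
    · simp only [buildST, if_pos hse, stSet_ne _ _ _ _ hne]
    · have hql : ¬ Des (2*pos+1) q := fun h => hq (Des_trans (Des_left hp) h)
      have hqr : ¬ Des (2*pos+2) q := fun h => hq (Des_trans (Des_right hp) h)
      simp only [buildST, if_neg hse]
      rw [stSet_ne _ _ _ _ hne, ih _ _ _ _ (by omega) q hqr, ih _ _ _ _ (by omega) q hql]

lemma updateST_frame (f : Nat) : ∀ (st : Std.HashMap Int Int) (s e idx pos : Int), 0 ≤ pos →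
    ∀ q, ¬ Des pos q → stGet (updateST f st s e idx pos) q = stGet st q := by
  induction f with
  | zero => intro st s e idx pos _ q _; rfl
  | succ f ih =>
    intro st s e idx pos hp q hq
    have hne : q ≠ pos := fun h => hq (h ▸ Des_refl pos)
    have hql : ¬ Des (2*pos+1) q := fun h => hq (Des_trans (Des_left hp) h)
    have hqr : ¬ Des (2*pos+2) q := fun h => hq (Des_trans (Des_right hp) h)
    by_cases hse : s = e ∧ s = idx
    · simp only [updateST, if_pos hse, stSet_ne _ _ _ _ hne]
    · simp only [updateST, if_neg hse]
      rw [stSet_ne _ _ _ _ hne]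
      by_cases hidx : idx ≤ pvMid s e
      · rw [if_pos hidx, ih _ _ _ _ _ (by omega) q hql]
      · rw [if_neg hidx, ih _ _ _ _ _ (by omega) q hqr]

-- TInv only reads st inside the subtree of pos
lemma TInv_frame (f : Nat) : ∀ (st st' : Std.HashMap Int Int) (d : Int → Bool) (s e pos : Int),
    0 ≤ pos → (∀ q, Des pos q → stGet st' q = stGet st q) → TInv f st d s e pos →
    TInv f st' d s e pos := by
  induction f with
  | zero => intro _ _ _ _ _ _ _ _ _; trivial
  | succ f ih =>
    intro st st' d s e pos hp hst h
    refine ⟨?_, fun hne => ?_⟩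
    · rw [hst pos (Des_refl pos)]; exact h.1
    · obtain ⟨hL, hR⟩ := h.2 hne
      exact ⟨ih _ _ _ _ _ _ (by omega) (fun q hq => hst q (Des_trans (Des_left hp) hq)) hL,
             ih _ _ _ _ _ _ (by omega) (fun q hq => hst q (Des_trans (Des_right hp) hq)) hR⟩

lemma cnt_congr {d d' : Int → Bool} {s e : Int} (h : ∀ x, s ≤ x → x ≤ e → d x = d' x) :
    cnt d s e = cnt d' s e := by
  unfold cnt
  have hf : List.filter d (PySem.List.pyRange s (e+1) 1) =
      List.filter d' (PySem.List.pyRange s (e+1) 1) := by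
    apply List.filter_congr
    intro x hx
    rw [PySem.List.mem_pyRange_one] at hx
    exact h x hx.1 (by omega)
  rw [hf]

-- TInv only reads d inside [s, e]
lemma TInv_congr_d (f : Nat) : ∀ (st : Std.HashMap Int Int) (d d' : Int → Bool) (s e pos : Int),
    s ≤ e → (∀ x, s ≤ x → x ≤ e → d x = d' x) → TInv f st d s e pos →
    TInv f st d' s e pos := by
  induction f with
  | zero => intro _ _ _ _ _ _ _ _ _; trivial
  | succ f ih =>
    intro st d d' s e pos hse hd h
    refine ⟨?_, fun hne => ?_⟩
    · rw [h.1, cnt_congr hd]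
    · have hslt : s < e := lt_of_le_of_ne hse hne
      obtain ⟨hm1, hm2⟩ := pvMid_bounds hslt
      obtain ⟨hL, hR⟩ := h.2 hne
      exact ⟨ih _ _ _ _ _ _ hm1 (fun x h1 h2 => hd x h1 (by omega)) hL,
             ih _ _ _ _ _ _ (by omega) (fun x h1 h2 => hd x (by omega) h2) hR⟩

lemma cnt_split (d : Int → Bool) {s m e : Int} (h1 : s ≤ m) (h2 : m < e) :
    cnt d s e = cnt d s m + cnt d (m+1) e := by
  unfold cnt
  rw [PySem.List.pyRange_one_append s (m+1) (e+1) (by omega) (by omega),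
      List.filter_append, List.length_append]
  push_cast
  ring

lemma cnt_true {s e : Int} (h : s ≤ e) : cnt (fun _ => true) s e = e - s + 1 := by
  unfold cnt
  rw [List.filter_true, PySem.List.length_pyRange_one]
  omega

lemma cnt_nonneg (d : Int → Bool) (s e : Int) : 0 ≤ cnt d s e := by
  unfold cnt; positivity

lemma cnt_le (d : Int → Bool) (s e : Int) (h : s ≤ e + 1) : cnt d s e ≤ e - s + 1 := by
  unfold cnt
  have hle := List.length_filter_le d (PySem.List.pyRange s (e+1) 1)
  have hlen := PySem.List.length_pyRange_one (a := s) (b := e+1)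
  omega

lemma cnt_toNat_len (d : Int → Bool) (s e : Int) :
    ((PySem.List.pyRange s (e+1) 1).filter d).length = (cnt d s e).toNat := by
  unfold cnt; omega

lemma TInv_root {f : Nat} {st : Std.HashMap Int Int} {d : Int → Bool} {s e pos : Int}
    (hf : 0 < f) (h : TInv f st d s e pos) : stGet st pos = cnt d s e := by
  cases f with
  | zero => omega
  | succ f => exact h.1

lemma build_correct (f : Nat) : ∀ (st : Std.HashMap Int Int) (s e pos : Int),
    (e - s).toNat < f → s ≤ e → 0 ≤ pos →
    TInv f (buildST f st s e pos) (fun _ => true) s e pos := by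
  induction f with
  | zero => intro st s e pos hf hse _; omega
  | succ f ih =>
    intro st s e pos hf hse hp
    by_cases heq : s = e
    · subst heq
      simp only [buildST, if_true]
      refine ⟨?_, fun hne => absurd rfl hne⟩
      rw [stSet_self, cnt_true le_rfl]
      ring
    · have hslt : s < e := lt_of_le_of_ne hse heq
      obtain ⟨hm1, hm2⟩ := pvMid_bounds hslt
      have hfpos : 0 < f := by omega
      simp only [buildST]
      rw [if_neg heq]
      set st1 := buildST f st s (pvMid s e) (2*pos+1) with hst1
      set st2 := buildST f st1 (pvMid s e + 1) e (2*pos+2) with hst2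
      have hL : TInv f st1 (fun _ => true) s (pvMid s e) (2*pos+1) :=
        ih st s (pvMid s e) (2*pos+1) (by omega) hm1 (by omega)
      have hR : TInv f st2 (fun _ => true) (pvMid s e + 1) e (2*pos+2) :=
        ih st1 (pvMid s e + 1) e (2*pos+2) (by omega) (by omega) (by omega)
      have hL2 : TInv f st2 (fun _ => true) s (pvMid s e) (2*pos+1) := by
        refine TInv_frame f st1 st2 _ _ _ _ (by omega) (fun q hq => ?_) hL
        exact buildST_frame f st1 (pvMid s e + 1) e (2*pos+2) (by omega) q
          (fun hdes => Des_disjoint hp hq hdes)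
      have hroot : ∀ q, Des (2*pos+1) q ∨ Des (2*pos+2) q → q ≠ pos := by
        intro q hq
        rcases hq with hq | hq
        · have := Des_le (by omega) hq; omega
        · have := Des_le (by omega) hq; omega
      refine ⟨?_, fun _ => ⟨?_, ?_⟩⟩
      · rw [stSet_self, TInv_root hfpos hL2, TInv_root hfpos hR,
            cnt_split (fun _ => true) hm1 hm2]
      · exact TInv_frame f st2 _ _ _ _ _ (by omega)
          (fun q hq => stSet_ne _ _ _ _ (hroot q (Or.inl hq))) hL2
      · exact TInv_frame f st2 _ _ _ _ _ (by omega)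
          (fun q hq => stSet_ne _ _ _ _ (hroot q (Or.inr hq))) hR

lemma update_correct (f : Nat) : ∀ (st : Std.HashMap Int Int) (d : Int → Bool) (s e idx pos : Int),
    (e - s).toNat < f → s ≤ e → 0 ≤ pos → s ≤ idx → idx ≤ e → TInv f st d s e pos →
    TInv f (updateST f st s e idx pos) (dset d idx) s e pos := by
  induction f with
  | zero => intro _ _ _ _ _ _ hf _ _ _ _ _; omega
  | succ f ih =>
    intro st d s e idx pos hf hse hp hi1 hi2 h
    by_cases heq : s = e
    · have hix : s = idx := by omega
      simp only [updateST]
      rw [if_pos (And.intro heq hix)]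
      refine ⟨?_, fun hne => absurd heq hne⟩
      rw [stSet_self]
      subst heq; subst hix
      unfold cnt
      rw [show s + 1 = s + 1 from rfl, PySem.List.pyRange_one_singleton]
      simp [dset]
    · have hslt : s < e := lt_of_le_of_ne hse heq
      obtain ⟨hm1, hm2⟩ := pvMid_bounds hslt
      have hfpos : 0 < f := by omega
      have hcond : ¬ (s = e ∧ s = idx) := fun hc => heq hc.1
      simp only [updateST]
      rw [if_neg hcond]
      obtain ⟨hL, hR⟩ := h.2 heq
      have hroot : ∀ q, Des (2*pos+1) q ∨ Des (2*pos+2) q → q ≠ pos := by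
        intro q hq
        rcases hq with hq | hq
        · have := Des_le (by omega) hq; omega
        · have := Des_le (by omega) hq; omega
      by_cases hidx : idx ≤ pvMid s e
      · rw [if_pos hidx]
        set st1 := updateST f st s (pvMid s e) idx (2*pos+1) with hst1
        have hL' : TInv f st1 (dset d idx) s (pvMid s e) (2*pos+1) :=
          ih st d s (pvMid s e) idx (2*pos+1) (by omega) hm1 (by omega) hi1 hidx hL
        have hR0 : TInv f st (dset d idx) (pvMid s e + 1) e (2*pos+2) := by
          refine TInv_congr_d f st d (dset d idx) (pvMid s e + 1) e (2*pos+2)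
            (by omega) (fun x h1 h2 => ?_) hR
          simp only [dset]
          rw [if_neg (by omega : ¬ x = idx)]
        have hR' : TInv f st1 (dset d idx) (pvMid s e + 1) e (2*pos+2) := by
          refine TInv_frame f st st1 _ _ _ _ (by omega) (fun q hq => ?_) hR0
          exact updateST_frame f st s (pvMid s e) idx (2*pos+1) (by omega) q
            (fun hdes => Des_disjoint hp hdes hq)
        refine ⟨?_, fun _ => ⟨?_, ?_⟩⟩
        · rw [stSet_self, TInv_root hfpos hL', TInv_root hfpos hR',
              cnt_split (dset d idx) hm1 hm2]
        · exact TInv_frame f st1 _ _ _ _ _ (by omega)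
            (fun q hq => stSet_ne _ _ _ _ (hroot q (Or.inl hq))) hL'
        · exact TInv_frame f st1 _ _ _ _ _ (by omega)
            (fun q hq => stSet_ne _ _ _ _ (hroot q (Or.inr hq))) hR'
      · rw [if_neg hidx]
        set st1 := updateST f st (pvMid s e + 1) e idx (2*pos+2) with hst1
        have hR' : TInv f st1 (dset d idx) (pvMid s e + 1) e (2*pos+2) :=
          ih st d (pvMid s e + 1) e idx (2*pos+2) (by omega) (by omega) (by omega)
            (by omega) hi2 hR
        have hL0 : TInv f st (dset d idx) s (pvMid s e) (2*pos+1) := by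
          refine TInv_congr_d f st d (dset d idx) s (pvMid s e) (2*pos+1)
            hm1 (fun x h1 h2 => ?_) hL
          simp only [dset]
          rw [if_neg (by omega : ¬ x = idx)]
        have hL' : TInv f st1 (dset d idx) s (pvMid s e) (2*pos+1) := by
          refine TInv_frame f st st1 _ _ _ _ (by omega) (fun q hq => ?_) hL0
          exact updateST_frame f st (pvMid s e + 1) e idx (2*pos+2) (by omega) q
            (fun hdes => Des_disjoint hp hq hdes)
        refine ⟨?_, fun _ => ⟨?_, ?_⟩⟩
        · rw [stSet_self, TInv_root hfpos hL', TInv_root hfpos hR',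
              cnt_split (dset d idx) hm1 hm2]
        · exact TInv_frame f st1 _ _ _ _ _ (by omega)
            (fun q hq => stSet_ne _ _ _ _ (hroot q (Or.inl hq))) hL'
        · exact TInv_frame f st1 _ _ _ _ _ (by omega)
            (fun q hq => stSet_ne _ _ _ _ (hroot q (Or.inr hq))) hR'

lemma count_correct (f : Nat) : ∀ (st : Std.HashMap Int Int) (d : Int → Bool) (s e k pos : Int)
    (r : Int), (e - s).toNat < f → s ≤ e → 0 ≤ pos → TInv f st d s e pos → 1 ≤ k →
    k ≤ cnt d s e → ((PySem.List.pyRange s (e+1) 1).filter d)[k.toNat - 1]? = some r →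
    countOne f st s e k pos = r + 1 := by
  induction f with
  | zero => intro _ _ _ _ _ _ _ hf _ _ _ _ _ _; omega
  | succ f ih =>
    intro st d s e k pos r hf hse hp h hk1 hk2 hr
    have hroot : stGet st pos = cnt d s e := h.1
    by_cases hfull : e - s + 1 = stGet st pos
    · simp only [countOne]
      rw [if_pos hfull]
      have hlen : ((PySem.List.pyRange s (e+1) 1).filter d).length
          = (PySem.List.pyRange s (e+1) 1).length := by
        rw [cnt_toNat_len, PySem.List.length_pyRange_one]
        omega
      have hfil : (PySem.List.pyRange s (e+1) 1).filter d = PySem.List.pyRange s (e+1) 1 :=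
        List.Sublist.eq_of_length List.filter_sublist hlen
      rw [hfil, PySem.List.getElem?_pyRange_one] at hr
      rw [if_pos (by rw [cnt_toNat_len] at hlen; omega)] at hr
      have := Option.some.inj hr
      omega
    · simp only [countOne]
      rw [if_neg hfull]
      by_cases heq : s = e
      · exfalso
        have h1 := cnt_le d s e (by omega)
        omega
      · rw [if_neg heq]
        have hslt : s < e := lt_of_le_of_ne hse heq
        obtain ⟨hm1, hm2⟩ := pvMid_bounds hslt
        have hfpos : 0 < f := by omega
        obtain ⟨hL, hR⟩ := h.2 heq
        have hstl : stGet st (2*pos+1) = cnt d s (pvMid s e) := TInv_root hfpos hL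
        have hsplit := cnt_split d (s := s) (m := pvMid s e) (e := e) hm1 (by omega)
        have happ : (PySem.List.pyRange s (e+1) 1).filter d
            = (PySem.List.pyRange s (pvMid s e + 1) 1).filter d
              ++ (PySem.List.pyRange (pvMid s e + 1) (e+1) 1).filter d := by
          rw [← List.filter_append,
              ← PySem.List.pyRange_one_append s (pvMid s e + 1) (e+1) (by omega) (by omega)]
        have hlen1 : (((PySem.List.pyRange s (pvMid s e + 1) 1).filter d).length : Int)
            = cnt d s (pvMid s e) := by
          rw [cnt_toNat_len]
          have := cnt_nonneg d s (pvMid s e)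
          omega
        have hcl := cnt_nonneg d s (pvMid s e)
        have hcr := cnt_nonneg d (pvMid s e + 1) e
        by_cases hkl : k ≤ stGet st (2*pos+1)
        · rw [if_pos hkl]
          refine ih st d s (pvMid s e) k (2*pos+1) r (by omega) hm1 (by omega) hL hk1
            (by omega) ?_
          rw [happ, List.getElem?_append_left (by omega)] at hr
          exact hr
        · rw [if_neg hkl]
          refine ih st d (pvMid s e + 1) e (k - stGet st (2*pos+1)) (2*pos+2) r (by omega)
            (by omega) (by omega) hR (by omega) (by omega) ?_
          rw [happ, List.getElem?_append_right (by omega)] at hr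
          have hix : (k - stGet st (2*pos+1)).toNat - 1
              = k.toNat - 1 - ((PySem.List.pyRange s (pvMid s e + 1) 1).filter d).length := by
            omega
          rw [hix]
          exact hr

lemma filter_dset_not_mem (R : List Int) (d : Int → Bool) (i : Int) (h : i ∉ R) :
    R.filter (dset d i) = R.filter d := by
  apply List.filter_congr
  intro x hx
  have hne : x ≠ i := fun he => h (he ▸ hx)
  simp [dset, hne]

-- removing a surviving 1-based position from the alive list = filtering with the updated map
lemma erase_map_filter : ∀ (R : List Int), R.Nodup → ∀ (d : Int → Bool) (i : Int),
    d i = true →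
    ((R.filter d).map (fun x => x + 1)).erase (i + 1) =
      (R.filter (dset d i)).map (fun x => x + 1) := by
  intro R
  induction R with
  | nil => intro _ d i _; rfl
  | cons a R ih =>
    intro hnd d i hd
    obtain ⟨hnm, hnd'⟩ := List.nodup_cons.mp hnd
    by_cases ha : a = i
    · subst ha
      rw [List.filter_cons_of_pos hd, List.map_cons, List.erase_cons_head,
          List.filter_cons_of_neg (by simp [dset]), filter_dset_not_mem R d a hnm]
    · have hda' : dset d i a = d a := by simp [dset, ha]
      by_cases hda : d a = true
      · rw [List.filter_cons_of_pos hda, List.filter_cons_of_pos (hda' ▸ hda),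
            List.map_cons, List.map_cons,
            List.erase_cons_tail (by simp; omega), ih hnd' d i hd]
      · rw [List.filter_cons_of_neg hda, List.filter_cons_of_neg (by rw [hda']; exact hda),
            ih hnd' d i hd]

lemma filter_dset_of_false (R : List Int) (d : Int → Bool) (i : Int) (hd : d i = false) :
    R.filter (dset d i) = R.filter d := by
  apply List.filter_congr
  intro x hx
  by_cases hx' : x = i
  · subst hx'; simp [dset, hd]
  · simp [dset, hx']

lemma loop_eq (n : Int) (hn : 1 ≤ n) : ∀ (B : List (Int × Int)) (st : Std.HashMap Int Int)
    (d : Int → Bool) (ans : List Int),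
    (∀ q ∈ B, (q.1 = 0 → 1 ≤ q.2 ∧ q.2 ≤ n) ∧ (q.1 ≠ 0 → 1 ≤ q.2)) →
    TInv n.toNat st d 0 (n-1) 0 →
    (B.foldl (solveStep n n.toNat) (st, ans)).2 =
      (B.foldl solveAltStep (((PySem.List.pyRange 0 n 1).filter d).map (fun x => x + 1), ans)).2 := by
  intro B
  induction B with
  | nil => intro st d ans _ _; rfl
  | cons q B ih =>
    intro st d ans hq hinv
    have hq0 := (hq q (List.mem_cons_self)).1
    have hq1 := (hq q (List.mem_cons_self)).2
    have hqB : ∀ p ∈ B, (p.1 = 0 → 1 ≤ p.2 ∧ p.2 ≤ n) ∧ (p.1 ≠ 0 → 1 ≤ p.2) :=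
      fun p hp => hq p (List.mem_cons_of_mem q hp)
    have hfpos : 0 < n.toNat := by omega
    have hrange : PySem.List.pyRange 0 (n-1+1) 1 = PySem.List.pyRange 0 n 1 := by norm_num
    have hst0 : stGet st 0 = cnt d 0 (n-1) := TInv_root hfpos hinv
    have hcnn := cnt_nonneg d 0 (n-1)
    have hflen : ((PySem.List.pyRange 0 n 1).filter d).length = (cnt d 0 (n-1)).toNat := by
      rw [← hrange, cnt_toNat_len]
    have hlen : ((((PySem.List.pyRange 0 n 1).filter d).map (fun x => x + 1)).length : Int)
        = cnt d 0 (n-1) := by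
      rw [List.length_map, hflen]
      omega
    simp only [List.foldl_cons]
    by_cases h0 : q.1 = 0
    · obtain ⟨hk1, hk2⟩ := hq0 h0
      have hsolve : solveStep n n.toNat (st, ans) q
          = (updateST n.toNat st 0 (n-1) (q.2-1) 0, ans) := by
        simp [solveStep, h0]
      have hinv' : TInv n.toNat (updateST n.toNat st 0 (n-1) (q.2-1) 0)
          (dset d (q.2-1)) 0 (n-1) 0 :=
        update_correct n.toNat st d 0 (n-1) (q.2-1) 0 (by omega) (by omega) le_rfl
          (by omega) (by omega) hinv
      have halt : solveAltStep (((PySem.List.pyRange 0 n 1).filter d).map (fun x => x + 1), ans) q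
          = (((PySem.List.pyRange 0 n 1).filter (dset d (q.2-1))).map (fun x => x + 1), ans) := by
        by_cases hdm : d (q.2 - 1) = true
        · have hmem : q.2 ∈ ((PySem.List.pyRange 0 n 1).filter d).map (fun x => x + 1) := by
            rw [List.mem_map]
            refine ⟨q.2 - 1, ?_, by ring⟩
            rw [List.mem_filter, PySem.List.mem_pyRange_one]
            exact ⟨⟨by omega, by omega⟩, hdm⟩
          simp only [solveAltStep]
          rw [if_pos h0, if_pos hmem,
              PySem.List.remove?_eq_some_erase _ q.2 hmem, Option.getD_some]
          have herase := erase_map_filter (PySem.List.pyRange 0 n 1)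
            (PySem.List.nodup_pyRange_one 0 n) d (q.2-1) hdm
          rw [show q.2 - 1 + 1 = q.2 by ring] at herase
          rw [herase]
        · have hmem : q.2 ∉ ((PySem.List.pyRange 0 n 1).filter d).map (fun x => x + 1) := by
            rw [List.mem_map]
            rintro ⟨x, hx, hx2⟩
            rw [List.mem_filter] at hx
            have : x = q.2 - 1 := by omega
            rw [this] at hx
            rw [hx.2] at hdm
            exact hdm rfl
          simp only [solveAltStep]
          rw [if_pos h0, if_neg hmem, filter_dset_of_false _ d (q.2-1)
            (by cases hv : d (q.2-1) <;> simp [hv] at hdm ⊢)]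
      rw [hsolve, halt]
      exact ih _ _ _ hqB hinv'
    · have hk1 : 1 ≤ q.2 := hq1 h0
      by_cases hbig : stGet st 0 < q.2
      · have h1 : solveStep n n.toNat (st, ans) q = (st, ans ++ [-1]) := by
          simp [solveStep, h0, hbig]
        have h2 : solveAltStep (((PySem.List.pyRange 0 n 1).filter d).map (fun x => x + 1), ans) q
            = (((PySem.List.pyRange 0 n 1).filter d).map (fun x => x + 1), ans ++ [-1]) := by
          simp only [solveAltStep]
          rw [if_neg h0, if_pos (by rw [hlen]; omega)]
        rw [h1, h2]
        exact ih _ _ _ hqB hinv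
      · have hk2 : q.2 ≤ cnt d 0 (n-1) := by omega
        have hidx : q.2.toNat - 1 < ((PySem.List.pyRange 0 n 1).filter d).length := by
          rw [hflen]; omega
        have hr : ((PySem.List.pyRange 0 n 1).filter d)[q.2.toNat - 1]?
            = some ((PySem.List.pyRange 0 n 1).filter d)[q.2.toNat - 1] :=
          List.getElem?_eq_getElem hidx
        have hcount := count_correct n.toNat st d 0 (n-1) q.2 0
          ((PySem.List.pyRange 0 n 1).filter d)[q.2.toNat - 1] (by omega) (by omega) le_rfl
          hinv hk1 hk2 (by rw [hrange]; exact hr)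
        have h1 : solveStep n n.toNat (st, ans) q
            = (st, ans ++ [((PySem.List.pyRange 0 n 1).filter d)[q.2.toNat - 1] + 1]) := by
          simp only [solveStep]
          rw [if_neg h0, if_neg hbig, hcount]
        have h2 : solveAltStep (((PySem.List.pyRange 0 n 1).filter d).map (fun x => x + 1), ans) q
            = (((PySem.List.pyRange 0 n 1).filter d).map (fun x => x + 1),
               ans ++ [((PySem.List.pyRange 0 n 1).filter d)[q.2.toNat - 1] + 1]) := by
          simp only [solveAltStep]
          rw [if_neg h0, if_neg (by rw [hlen]; omega),
              PySem.List.pyGet?_of_nonneg _ (by omega : (0:Int) ≤ q.2 - 1),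
              List.getElem?_map, show (q.2 - 1).toNat = q.2.toNat - 1 by omega, hr]
          rfl
        rw [h1, h2]
        exact ih _ _ _ hqB hinv

lemma map_add_one_filter_true (n : Int) :
    ((PySem.List.pyRange 0 n 1).filter (fun _ => true)).map (fun x => x + 1)
      = PySem.List.pyRange 1 (n+1) 1 := by
  rw [List.filter_true, PySem.List.pyRange_one 0 n, PySem.List.pyRange_one 1 (n+1),
      List.map_map, show n + 1 - 1 = n - 0 by ring]
  congr 1
  funext k
  simp [Function.comp]
  ring

-- ===== VERDICT (by name: the statement is the Claim_ definition above) =====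
theorem solve_spec : Claim_equal_solve := by
  unfold Claim_equal_solve
  intro A B _ hpre
  obtain ⟨hA, hq⟩ := hpre
  unfold Spec_solve solve solve_alt
  have hbuild := build_correct A.toNat ∅ 0 (A-1) 0 (by omega) (by omega) le_rfl
  have hloop := loop_eq A hA B (buildST A.toNat ∅ 0 (A-1) 0) (fun _ => true) []
    hq hbuild
  rw [hloop, map_add_one_filter_true]
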